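-- pv_equiv track=rewrite | github.com/hlibbabii/log-recommender | log_recommender/java_parser.py | strip_off_multiline_comments
-- ===== SOURCE A (Python) =====
-- START_MULTILINE_COMMENT = "/*"
--
-- END_MULTILINE_COMMENT = "*/"
--
-- placeholders= {
--     'comment': '`comment`',
--     'string_literal': '`stringliteral`',
--     'hex_start': '`hexstart`',
--     'identifier': '`identifier`',
--     'number_separator': '`numsep`',
--     'same_case_separator': '`scsep`',
--     'camel_case_separator': '`ccsep`',
--     'underscore_separator': '`ussep`',
--     'dot': '`dot`',
--     'long': '`lng`',
--     'float': '`flt`',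
--     'double': '`double`',
--     'e': '`e`'
-- }
--
-- def strip_off_multiline_comments(context):
--     while True:
--         try:
--             start = context.index(START_MULTILINE_COMMENT)
--         except ValueError:
--             start = None
--         try:
--             end = context.index(END_MULTILINE_COMMENT)
--         except ValueError:
--             end = None
--
--         if start is None and end is None:
--             return context
--         elif end is None:
--             del(context[start:])
--             context.append(placeholders['comment'])
--         elif start is None or end < start:
--             del(context[:end+1])
--             context.insert(0, placeholders['comment'])
--         elif start < end:
--             del(context[start:end+1])
--             context.insert(start, placeholders['comment'])
-- ===== SOURCE B (Python) =====
-- # Single left-to-right pass state machine; mutates context in place like A (context[:] = out).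
-- def strip_off_multiline_comments(context):
--     out = []
--     in_comment = False
--     for token in context:
--         if in_comment:
--             if token == "*/":
--                 out.append('`comment`')
--                 in_comment = False
--         elif token == "/*":
--             in_comment = True
--         elif token == "*/":
--             out = ['`comment`']
--         else:
--             out.append(token)
--     if in_comment:
--         out.append('`comment`')
--     context[:] = out
--     return context
-- ===== Notes on version B (the rewrite author's own statement) =====
-- stated objective: alternative
-- what changed: Replaced A's while-loop of repeated list.index scans and in-place splicing with a single left-to-right state-machine pass that builds the output once (discarding accumulated output on a stray close marker); worst-case quadratic rescanning disappears, though on marker-sparse inputs the measured times are comparable.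
import Mathlib
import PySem

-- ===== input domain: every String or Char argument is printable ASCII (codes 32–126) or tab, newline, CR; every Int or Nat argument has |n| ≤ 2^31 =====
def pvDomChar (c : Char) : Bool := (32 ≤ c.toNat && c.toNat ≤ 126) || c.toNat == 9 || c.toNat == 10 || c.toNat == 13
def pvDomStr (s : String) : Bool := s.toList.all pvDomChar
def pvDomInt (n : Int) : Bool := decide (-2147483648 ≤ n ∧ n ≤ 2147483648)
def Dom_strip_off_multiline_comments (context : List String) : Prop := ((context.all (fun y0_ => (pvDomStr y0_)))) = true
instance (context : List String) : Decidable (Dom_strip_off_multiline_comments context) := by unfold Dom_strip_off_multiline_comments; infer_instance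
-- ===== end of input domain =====

-- B is a single left-to-right state-machine pass instead of A's repeated context.index
-- scans with in-place splicing; return values agree everywhere (both A and B mutate the
-- list argument in place; the equivalence proved is about the return value).

-- ===== PORT A =====
-- placeholders['comment'] from the module-level dict (the only entry A reads)
def placeholder_comment : String := "`comment`"

lemma cm_not_marker : ((placeholder_comment == "/*") || (placeholder_comment == "*/")) = false := by decide

-- termination measure for A's 'while True' loop: each non-returning iteration
-- deletes at least one marker token and inserts none
def pvMarkers (xs : List String) : Nat := xs.countP (fun x => x == "/*" || x == "*/")

lemma pvMarkers_eq_zero {xs : List String} (h1 : "/*" ∉ xs) (h2 : "*/" ∉ xs) :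
    pvMarkers xs = 0 := by
  refine List.countP_eq_zero.mpr (fun x hx => ?_)
  simp only [Bool.or_eq_true, beq_iff_eq, not_or]
  exact ⟨fun h => h1 (h ▸ hx), fun h => h2 (h ▸ hx)⟩

lemma pvMarkers_decomp (pre suf : List String) (v : String)
    (hv : (v == "/*" || v == "*/") = true) :
    pvMarkers suf < pvMarkers (pre ++ v :: suf) := by
  simp [pvMarkers, List.countP_append, hv]
  omega

lemma index?_decomp {xs : List String} {v : String} {k : Nat}
    (h : PySem.List.index? xs v = some k) :
    xs = xs.take k ++ v :: xs.drop (k+1) ∧ v ∉ xs.take k := by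
  obtain ⟨pre, suf, hx, hlen, hmem⟩ := (PySem.List.index?_eq_some_iff xs v k).mp h
  subst hlen
  have htake : xs.take pre.length = pre := by rw [hx]; exact List.take_left ..
  have hdrop : xs.drop (pre.length + 1) = suf := by
    rw [hx, show pre.length + 1 = (pre ++ [v]).length by simp,
        show pre ++ v :: suf = (pre ++ [v]) ++ suf by simp]
    exact List.drop_left ..
  rw [htake, hdrop]
  exact ⟨hx, hmem⟩

-- if the first occurrence of v is at index s < e, the prefix of length e splits around v
lemma take_mid_decomp (ctx : List String) (v : String) (s e : Nat) (_hse : s < e)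
    (hsl : s ≤ ctx.length)
    (hxs : ctx = ctx.take s ++ v :: ctx.drop (s+1)) :
    ctx.take e = ctx.take s ++ v :: (ctx.drop (s+1)).take (e - (s+1)) := by
  have hlen : (ctx.take s).length = s := by simp [List.length_take]; omega
  conv_lhs => rw [hxs]
  rw [List.take_append, List.take_of_length_le (by omega), hlen,
      show e - s = (e - (s+1)) + 1 by omega, List.take_succ_cons]

-- A's while-True loop, transliterated: find first "/*" and first "*/", then the elif chain.
-- del(context[start:]) = take start; del(context[:end+1]) = drop (end+1); insert/append as shown.
def stripLoop (context : List String) : List String :=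
  match h1 : PySem.List.index? context "/*", h2 : PySem.List.index? context "*/" with
  | none, none => context
  | some s, none =>
      -- del(context[start:]); context.append(comment); continue the loop
      stripLoop (context.take s ++ [placeholder_comment])
  | none, some e =>
      -- del(context[:end+1]); context.insert(0, comment); continue the loop
      stripLoop (placeholder_comment :: context.drop (e+1))
  | some s, some e =>
      if he : e < s then
        stripLoop (placeholder_comment :: context.drop (e+1))
      else if hs : s < e then
        -- del(context[start:end+1]); context.insert(start, comment); continue the loop
        stripLoop (context.take s ++ placeholder_comment :: context.drop (e+1))
      else
        -- s = e is impossible: one cell cannot equal both "/*" and "*/"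
        context
termination_by pvMarkers context
decreasing_by
  · obtain ⟨hx, hpre⟩ := index?_decomp h1
    have hend : "*/" ∉ context := (PySem.List.index?_eq_none_iff context "*/").mp h2
    have hz : pvMarkers (context.take s ++ [placeholder_comment]) = 0 :=
      pvMarkers_eq_zero
        (by simpa [placeholder_comment] using hpre)
        (by simpa [placeholder_comment] using
          (fun hm => hend (List.mem_of_mem_take hm) : "*/" ∉ context.take s))
    have hpos : 0 < pvMarkers context := by
      rw [hx]; exact Nat.lt_of_le_of_lt (Nat.zero_le _) (pvMarkers_decomp _ _ _ (by decide))
    omega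
  · obtain ⟨hx, _⟩ := index?_decomp h2
    calc pvMarkers (placeholder_comment :: context.drop (e+1))
        = pvMarkers (context.drop (e+1)) := by
          simp [pvMarkers, cm_not_marker]
      _ < pvMarkers context := by
          conv_rhs => rw [hx]
          exact pvMarkers_decomp _ _ _ (by decide)
  · obtain ⟨hx, _⟩ := index?_decomp h2
    calc pvMarkers (placeholder_comment :: context.drop (e+1))
        = pvMarkers (context.drop (e+1)) := by
          simp [pvMarkers, cm_not_marker]
      _ < pvMarkers context := by
          conv_rhs => rw [hx]
          exact pvMarkers_decomp _ _ _ (by decide)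
  · obtain ⟨hxe, hpre_e⟩ := index?_decomp h2
    obtain ⟨hxs, hpre_s⟩ := index?_decomp h1
    obtain ⟨hk, -, -⟩ := PySem.List.getElem_of_index?_eq_some h1
    have hmid := take_mid_decomp context "/*" s e hs (Nat.le_of_lt hk) hxs
    have hs_pref : "*/" ∉ context.take s := by
      intro hm
      exact hpre_e (by rw [hmid]; exact List.mem_append_left _ hm)
    have hz : pvMarkers (context.take s) = 0 := pvMarkers_eq_zero hpre_s hs_pref
    calc pvMarkers (context.take s ++ placeholder_comment :: context.drop (e+1))
        = pvMarkers (context.drop (e+1)) := by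
          simp [pvMarkers, List.countP_append, cm_not_marker]
          simpa [pvMarkers] using hz
      _ < pvMarkers context := by
          conv_rhs => rw [hxe]
          exact pvMarkers_decomp _ _ _ (by decide)

def strip_off_multiline_comments (context : List String) : List String :=
  stripLoop context

-- ===== PORT B =====
-- one step of B's for-loop: state = (accumulated output, in_comment flag)
def bStep (st : List String × Bool) (t : String) : List String × Bool :=
  if st.2 then
    if t == "*/" then (st.1 ++ ["`comment`"], false) else (st.1, true)
  else if t == "/*" then (st.1, true)
  else if t == "*/" then (["`comment`"], false)
  else (st.1 ++ [t], false)

def strip_off_multiline_comments_alt (context : List String) : List String :=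
  let st := context.foldl bStep ([], false)
  if st.2 then st.1 ++ ["`comment`"] else st.1

-- ===== PRECONDITION & SPEC =====
def Spec_strip_off_multiline_comments (context : List String) (out : List String) : Prop := out = strip_off_multiline_comments_alt context
instance (context : List String) (out : List String) : Decidable (Spec_strip_off_multiline_comments context out) := by unfold Spec_strip_off_multiline_comments; infer_instance

-- ===== CLAIM (what is proved, stated in full; the proofs are below) =====
def Claim_equal_strip_off_multiline_comments : Prop := ∀ (context : List String), Dom_strip_off_multiline_comments context → Spec_strip_off_multiline_comments context (strip_off_multiline_comments context)

-- ===== LEMMAS AND PROOFS =====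

-- a run over marker-free tokens outside a comment just copies them
lemma foldl_bStep_clean (xs : List String) (out : List String)
    (h1 : "/*" ∉ xs) (h2 : "*/" ∉ xs) :
    xs.foldl bStep (out, false) = (out ++ xs, false) := by
  induction xs generalizing out with
  | nil => simp
  | cons x xs ih =>
    simp only [List.mem_cons, not_or] at h1 h2
    have hx1 : ¬ x = "/*" := fun h => h1.1 h.symm
    have hx2 : ¬ x = "*/" := fun h => h2.1 h.symm
    rw [List.foldl_cons, show bStep (out, false) x = (out ++ [x], false) by
          simp [bStep, hx1, hx2],
        ih _ h1.2 h2.2]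
    simp

-- a run with no "*/" inside a comment discards everything
lemma foldl_bStep_inComment (xs : List String) (out : List String)
    (h2 : "*/" ∉ xs) :
    xs.foldl bStep (out, true) = (out, true) := by
  induction xs with
  | nil => simp
  | cons x xs ih =>
    simp only [List.mem_cons, not_or] at h2
    have hx2 : ¬ x = "*/" := fun h => h2.1 h.symm
    rw [List.foldl_cons, show bStep (out, true) x = (out, true) by simp [bStep, hx2],
        ih h2.2]

-- evaluating B's fold over a decomposed input, one segment at a time
lemma main_equiv : ∀ context : List String,
    stripLoop context = strip_off_multiline_comments_alt context := by
  intro context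
  fun_induction stripLoop context with
  | case1 ctx h1 h2 =>
    have hns : "/*" ∉ ctx := (PySem.List.index?_eq_none_iff ctx "/*").mp h1
    have hne : "*/" ∉ ctx := (PySem.List.index?_eq_none_iff ctx "*/").mp h2
    simp [strip_off_multiline_comments_alt, foldl_bStep_clean ctx [] hns hne]
  | case2 ctx s h1 h2 ih =>
    obtain ⟨hx, hpre⟩ := index?_decomp h1
    have hne : "*/" ∉ ctx := (PySem.List.index?_eq_none_iff ctx "*/").mp h2
    have hpe : "*/" ∉ ctx.take s := fun hm => hne (List.mem_of_mem_take hm)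
    have hnd : "*/" ∉ ctx.drop (s+1) := fun hm => hne (List.mem_of_mem_drop hm)
    have hL : strip_off_multiline_comments_alt (ctx.take s ++ [placeholder_comment])
        = ctx.take s ++ [placeholder_comment] := by
      simp only [strip_off_multiline_comments_alt]
      rw [foldl_bStep_clean _ _ (by simpa [placeholder_comment] using hpre)
            (by simpa [placeholder_comment] using hpe)]
      simp
    have hR : strip_off_multiline_comments_alt ctx
        = ctx.take s ++ [placeholder_comment] := by
      conv_lhs => rw [show ctx = (ctx.take s ++ ["/*"]) ++ ctx.drop (s+1) by
        conv_lhs => rw [hx]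
        simp]
      simp only [strip_off_multiline_comments_alt, List.foldl_append]
      rw [foldl_bStep_clean _ _ hpre hpe]
      simp only [List.foldl_cons, List.foldl_nil, List.nil_append]
      rw [show bStep (ctx.take s, false) "/*" = (ctx.take s, true) by simp [bStep],
          foldl_bStep_inComment _ _ hnd]
      simp [placeholder_comment]
    rw [ih, hL, hR]
  | case3 ctx e h1 h2 ih =>
    obtain ⟨hx, hpre⟩ := index?_decomp h2
    have hns : "/*" ∉ ctx := (PySem.List.index?_eq_none_iff ctx "/*").mp h1
    have hps : "/*" ∉ ctx.take e := fun hm => hns (List.mem_of_mem_take hm)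
    rw [ih]
    have hR : strip_off_multiline_comments_alt ctx
        = strip_off_multiline_comments_alt (placeholder_comment :: ctx.drop (e+1)) := by
      conv_lhs => rw [show ctx = (ctx.take e ++ ["*/"]) ++ ctx.drop (e+1) by
        conv_lhs => rw [hx]
        simp]
      simp only [strip_off_multiline_comments_alt, List.foldl_append, List.foldl_cons,
        List.foldl_nil]
      rw [foldl_bStep_clean _ _ hps hpre]
      simp only [List.nil_append]
      rw [show bStep (ctx.take e, false) "*/" = (["`comment`"], false) by simp [bStep],
          show bStep (([] : List String), false) placeholder_comment
            = (["`comment`"], false) by simp [bStep, placeholder_comment]]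
    rw [hR]
  | case4 ctx s e h1 h2 he ih =>
    -- stray close: e < s
    obtain ⟨hxe, hpre_e⟩ := index?_decomp h2
    obtain ⟨hxs, hpre_s⟩ := index?_decomp h1
    obtain ⟨hk, -, -⟩ := PySem.List.getElem_of_index?_eq_some h2
    have hmid := take_mid_decomp ctx "*/" e s he (Nat.le_of_lt hk) hxe
    have hps : "/*" ∉ ctx.take e := by
      intro hm
      exact hpre_s (by rw [hmid]; exact List.mem_append_left _ hm)
    rw [ih]
    have hR : strip_off_multiline_comments_alt ctx
        = strip_off_multiline_comments_alt (placeholder_comment :: ctx.drop (e+1)) := by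
      conv_lhs => rw [show ctx = (ctx.take e ++ ["*/"]) ++ ctx.drop (e+1) by
        conv_lhs => rw [hxe]
        simp]
      simp only [strip_off_multiline_comments_alt, List.foldl_append, List.foldl_cons,
        List.foldl_nil]
      rw [foldl_bStep_clean _ _ hps hpre_e]
      simp only [List.nil_append]
      rw [show bStep (ctx.take e, false) "*/" = (["`comment`"], false) by simp [bStep],
          show bStep (([] : List String), false) placeholder_comment
            = (["`comment`"], false) by simp [bStep, placeholder_comment]]
    rw [hR]
  | case5 ctx s e h1 h2 he hs ih =>
    -- proper comment: s < e
    obtain ⟨hxe, hpre_e⟩ := index?_decomp h2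
    obtain ⟨hxs, hpre_s⟩ := index?_decomp h1
    obtain ⟨hk, -, -⟩ := PySem.List.getElem_of_index?_eq_some h1
    have hmid := take_mid_decomp ctx "/*" s e hs (Nat.le_of_lt hk) hxs
    have hse' : "*/" ∉ ctx.take s := by
      intro hm
      exact hpre_e (by rw [hmid]; exact List.mem_append_left _ hm)
    have hmid_ne : "*/" ∉ (ctx.drop (s+1)).take (e - (s+1)) := by
      intro hm
      exact hpre_e (by rw [hmid]; exact List.mem_append_right _ (List.mem_cons_of_mem _ hm))
    rw [ih]
    have hR : strip_off_multiline_comments_alt ctx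
        = strip_off_multiline_comments_alt
            (ctx.take s ++ placeholder_comment :: ctx.drop (e+1)) := by
      conv_lhs => rw [show ctx = (((ctx.take s ++ ["/*"])
            ++ (ctx.drop (s+1)).take (e - (s+1))) ++ ["*/"]) ++ ctx.drop (e+1) by
        conv_lhs => rw [hxe, hmid]
        simp]
      conv_rhs => rw [show ctx.take s ++ placeholder_comment :: ctx.drop (e+1)
          = (ctx.take s ++ [placeholder_comment]) ++ ctx.drop (e+1) by simp]
      simp only [strip_off_multiline_comments_alt, List.foldl_append, List.foldl_cons,
        List.foldl_nil]
      rw [foldl_bStep_clean _ _ hpre_s hse']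
      simp only [List.nil_append]
      rw [show bStep (ctx.take s, false) placeholder_comment
            = (ctx.take s ++ ["`comment`"], false) by simp [bStep, placeholder_comment]]
      rw [show bStep (ctx.take s, false) "/*" = (ctx.take s, true) by simp [bStep]]
      rw [foldl_bStep_inComment _ _ hmid_ne]
      rw [show bStep (ctx.take s, true) "*/" = (ctx.take s ++ ["`comment`"], false) by
            simp [bStep]]
    rw [hR]
  | case6 ctx s e h1 h2 he hs =>
    -- unreachable: s = e would put both markers in the same cell
    exfalso
    obtain ⟨hk, hgs, -⟩ := PySem.List.getElem_of_index?_eq_some h1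
    obtain ⟨hk2, hge, -⟩ := PySem.List.getElem_of_index?_eq_some h2
    have hes : s = e := by omega
    subst hes
    rw [hgs] at hge
    exact absurd hge (by decide)

-- ===== VERDICT (by name: the statement is the Claim_ definition above) =====
theorem strip_off_multiline_comments_spec : Claim_equal_strip_off_multiline_comments := by
  intro context _
  unfold Spec_strip_off_multiline_comments strip_off_multiline_comments
  exact main_equiv context
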